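-- pv_equiv track=rewrite | github.com/ringoldsdev/laygo-python | performance_test.py | chunked_generator_listcomp_approach
-- ===== SOURCE A (Python) =====
-- def chunked_generator_listcomp_approach(data: list[int]) -> list[int]:
--   """Process data using chunked generators with intermediate lists per chunk."""
--
--   def chunk_generator(data, chunk_size=1000):
--     """Generate chunks using a generator."""
--     for i in range(0, len(data), chunk_size):
--       yield data[i : i + chunk_size]
--
--   # Process each chunk with intermediate lists and combine
--   results = []
--   for chunk in chunk_generator(data):
--     # Create intermediate lists for each chunk
--     step1 = [x for x in chunk if x % 2 == 0]  # Filter even numbers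
--     step2 = [x * 2 for x in step1]  # Double them
--     step3 = [x for x in step2 if x > 100]  # Filter > 100
--     step4 = [x + 1 for x in step3]  # Add 1
--     results.extend(step4)
--   return results
-- ===== SOURCE B (Python) =====
-- def chunked_generator_listcomp_approach(data: list[int]) -> list[int]:
--   """Single fused pass: no chunking, no intermediate lists."""
--   return [x * 2 + 1 for x in data if x % 2 == 0 and x * 2 > 100]
-- ===== Notes on version B (the rewrite author's own statement) =====
-- stated objective: simpler
-- what changed: Replaced the chunk generator and the four intermediate per-chunk lists with one flat fused comprehension over data (predicate x%2==0 and x*2>100, emitting x*2+1).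
import Mathlib
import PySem

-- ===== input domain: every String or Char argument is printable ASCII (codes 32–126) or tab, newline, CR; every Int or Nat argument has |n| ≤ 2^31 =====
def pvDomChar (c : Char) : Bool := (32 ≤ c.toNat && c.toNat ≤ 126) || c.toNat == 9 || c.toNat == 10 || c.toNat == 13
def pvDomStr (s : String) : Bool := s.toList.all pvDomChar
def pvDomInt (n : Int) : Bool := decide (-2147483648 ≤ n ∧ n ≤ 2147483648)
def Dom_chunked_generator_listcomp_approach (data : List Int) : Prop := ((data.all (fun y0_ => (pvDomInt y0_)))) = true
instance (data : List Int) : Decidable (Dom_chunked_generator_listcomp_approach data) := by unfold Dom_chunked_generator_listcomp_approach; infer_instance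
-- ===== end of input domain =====

-- B merges the chunk loop and the four intermediate lists into one fused filter+map pass; objective: simpler.

-- ===== PORT A =====
-- literal port: chunk_generator yields data[i:i+1000] for i in range(0, len(data), 1000);
-- each chunk goes through the four intermediate lists step1..step4, extended into results.
def chunked_generator_listcomp_approach (data : List Int) : List Int :=
  (PySem.List.pyRange 0 (data.length : Int) 1000).foldl
    (fun results i =>
      let chunk := PySem.List.slice data (some i) (some (i + 1000))
      let step1 := chunk.filter (fun x => PySem.Int.mod x 2 == 0)
      let step2 := step1.map (fun x => x * 2)
      let step3 := step2.filter (fun x => decide (x > 100))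
      let step4 := step3.map (fun x => x + 1)
      results ++ step4) []

-- ===== PORT B =====
def chunked_generator_listcomp_approach_alt (data : List Int) : List Int :=
  (data.filter (fun x => PySem.Int.mod x 2 == 0 && decide (x * 2 > 100))).map (fun x => x * 2 + 1)

-- ===== PRECONDITION & SPEC =====
def Spec_chunked_generator_listcomp_approach (data : List Int) (out : List Int) : Prop := out = chunked_generator_listcomp_approach_alt data
instance (data : List Int) (out : List Int) : Decidable (Spec_chunked_generator_listcomp_approach data out) := by unfold Spec_chunked_generator_listcomp_approach; infer_instance

-- ===== CLAIM (what is proved, stated in full; the proofs are below) =====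
def Claim_equal_chunked_generator_listcomp_approach : Prop := ∀ (data : List Int), Dom_chunked_generator_listcomp_approach data → Spec_chunked_generator_listcomp_approach data (chunked_generator_listcomp_approach data)

-- ===== LEMMAS AND PROOFS =====

-- fusing the four per-chunk lists gives B's single pass
lemma pvFuse (l : List Int) :
    (((((l.filter (fun x => PySem.Int.mod x 2 == 0)).map (fun x => x * 2)).filter
      (fun x => decide (x > 100))).map (fun x => x + 1)))
    = chunked_generator_listcomp_approach_alt l := by
  unfold chunked_generator_listcomp_approach_alt
  induction l with
  | nil => rfl
  | cons a t ih =>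
    rcases Bool.eq_false_or_eq_true (PySem.Int.mod a 2 == 0) with h1 | h1 <;>
      rcases Bool.eq_false_or_eq_true (decide (a * 2 > 100)) with h2 | h2 <;>
      simp only [List.filter_cons, List.map_cons, h1, h2,
        Bool.true_and, Bool.false_and, Bool.and_true, Bool.and_false,
        Bool.false_eq_true, if_true, if_false, ite_true, ite_false, ih]

lemma pvAlt_append (l₁ l₂ : List Int) :
    chunked_generator_listcomp_approach_alt (l₁ ++ l₂)
    = chunked_generator_listcomp_approach_alt l₁ ++ chunked_generator_listcomp_approach_alt l₂ := by
  simp [chunked_generator_listcomp_approach_alt]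

-- step-1000 range unfolding
lemma pvRange_cons (a b : Int) (h : a < b) :
    PySem.List.pyRange a b 1000 = a :: PySem.List.pyRange (a + 1000) b 1000 := by
  rw [PySem.List.pyRange_of_pos a b (by norm_num), PySem.List.pyRange_of_pos (a + 1000) b (by norm_num)]
  have hc : (if a < b then ((b - a + 1000 - 1) / 1000).toNat else 0)
      = (if a + 1000 < b then ((b - (a + 1000) + 1000 - 1) / 1000).toNat else 0) + 1 := by
    split_ifs <;> omega
  rw [hc, List.range_succ_eq_map, List.map_cons, List.map_map]
  congr 1
  · simp
  · apply List.map_congr_left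
    intro k _
    simp only [Function.comp_apply]
    push_cast
    ring

-- main loop invariant: from chunk start i onward, A's fold appends B's value on data.drop i
lemma pvLoop (n : Nat) : ∀ (data : List Int) (i : Nat) (acc : List Int),
    data.length ≤ i + n * 1000 →
    (PySem.List.pyRange (i : Int) (data.length : Int) 1000).foldl
      (fun results j =>
        let chunk := PySem.List.slice data (some j) (some (j + 1000))
        let step1 := chunk.filter (fun x => PySem.Int.mod x 2 == 0)
        let step2 := step1.map (fun x => x * 2)
        let step3 := step2.filter (fun x => decide (x > 100))
        let step4 := step3.map (fun x => x + 1)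
        results ++ step4) acc
    = acc ++ chunked_generator_listcomp_approach_alt (data.drop i) := by
  induction n with
  | zero =>
    intro data i acc hle
    have hnil : PySem.List.pyRange (i : Int) (data.length : Int) 1000 = [] := by
      rw [PySem.List.pyRange_of_pos _ _ (by norm_num)]
      have : ¬ ((i : Int) < (data.length : Int)) := by exact_mod_cast by omega
      simp [this]
    rw [hnil]
    have hdrop : data.drop i = [] := List.drop_eq_nil_of_le (by omega)
    simp [hdrop, chunked_generator_listcomp_approach_alt]
  | succ n ih =>
    intro data i acc hle
    by_cases hlt : i < data.length
    · rw [pvRange_cons _ _ (by exact_mod_cast hlt), List.foldl_cons]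
      have hslice : PySem.List.slice data (some (i : Int)) (some ((i : Int) + 1000))
          = (data.drop i).take 1000 := by
        have : ((i : Int) + 1000) = ((i + 1000 : Nat) : Int) := by push_cast; ring
        rw [this]
        exact PySem.List.slice_natCast_add data i 1000
      have hcast : (i : Int) + 1000 = ((i + 1000 : Nat) : Int) := by push_cast; ring
      rw [hslice, hcast, ih data (i + 1000) _ (by omega)]
      simp only [pvFuse]
      have hsplit : data.drop i = (data.drop i).take 1000 ++ data.drop (i + 1000) := by
        rw [← List.drop_drop]
        exact (List.take_append_drop 1000 (data.drop i)).symm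
      conv_rhs => rw [hsplit]
      rw [pvAlt_append, List.append_assoc]
    · have hnil : PySem.List.pyRange (i : Int) (data.length : Int) 1000 = [] := by
        rw [PySem.List.pyRange_of_pos _ _ (by norm_num)]
        have : ¬ ((i : Int) < (data.length : Int)) := by exact_mod_cast by omega
        simp [this]
      rw [hnil]
      have hdrop : data.drop i = [] := List.drop_eq_nil_of_le (by omega)
      simp [hdrop, chunked_generator_listcomp_approach_alt]

-- ===== VERDICT (by name: the statement is the Claim_ definition above) =====
theorem chunked_generator_listcomp_approach_spec : Claim_equal_chunked_generator_listcomp_approach := by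
  intro data _
  unfold Spec_chunked_generator_listcomp_approach chunked_generator_listcomp_approach
  have h := pvLoop data.length data 0 [] (by omega)
  simpa using h
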